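-- pv_equiv track=rewrite | github.com/vasstekla/codility | 12.euclidean_algorithm/lesson_12_chocolates_by_numbers.py | solution
-- ===== SOURCE A (Python) =====
-- def solution(N, M):
--     X = 0
--     chocolates_eaten = 1
--     calc = int((X+M)%N)
--
--     while(calc != 0):
--         X = calc
--         chocolates_eaten += 1
--         calc = int((X+M)%N)
--
--     return chocolates_eaten
-- ===== SOURCE B (Python) =====
-- def solution(N, M):
--     # Euclidean algorithm instead of simulating the walk: answer = N // gcd(N, M).
--     a, b = M % N, N
--     while b:
--         a, b = b, a % b
--     return N // a
-- ===== Notes on version B (the rewrite author's own statement) =====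
-- stated objective: faster
-- what changed: B computes N // gcd(N, M) with the Euclidean algorithm instead of simulating the chocolate-eating walk step by step.
import Mathlib
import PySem

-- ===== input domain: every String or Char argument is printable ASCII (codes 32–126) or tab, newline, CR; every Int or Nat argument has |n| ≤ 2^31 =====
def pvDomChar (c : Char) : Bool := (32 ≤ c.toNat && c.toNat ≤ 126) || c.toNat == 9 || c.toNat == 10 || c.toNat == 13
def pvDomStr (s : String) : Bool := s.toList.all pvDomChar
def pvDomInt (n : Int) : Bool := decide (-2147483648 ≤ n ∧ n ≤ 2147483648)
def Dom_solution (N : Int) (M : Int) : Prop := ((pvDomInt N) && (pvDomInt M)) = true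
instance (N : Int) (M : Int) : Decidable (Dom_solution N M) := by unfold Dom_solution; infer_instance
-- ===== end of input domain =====

-- B replaces A's step-by-step walk simulation by the Euclidean algorithm (N // gcd(N, M)); faster.


-- ===== PORT A =====
-- the while loop: calcV is recomputed at the end of each iteration, exactly as in A;
-- fuel only makes the recursion total (N.natAbs iterations always suffice, proved below)
def solutionGo (N M : Int) (calcV eaten : Int) (fuel : Nat) : Int :=
  match fuel with
  | 0 => eaten
  | f + 1 =>
      if calcV ≠ 0 then
        solutionGo N M (PySem.Int.mod (calcV + M) N) (eaten + 1) f
      else eaten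

def solution (N : Int) (M : Int) : Int :=
  let X : Int := 0
  let eaten : Int := 1
  let calcV := PySem.Int.mod (X + M) N
  solutionGo N M calcV eaten N.natAbs

-- ===== PORT B =====
-- termination measure for the Euclidean loop (cited by euclidGo's decreasing_by)
theorem natAbs_pymod_lt (a b : Int) (hb : b ≠ 0) : (PySem.Int.mod a b).natAbs < b.natAbs := by
  rcases lt_or_gt_of_ne hb with h | h
  · have := PySem.Int.mod_neg_bounds a h; omega
  · have h1 := PySem.Int.mod_nonneg a h
    have h2 := PySem.Int.mod_lt a h; omega

-- while b: a, b = b, a % b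
def euclidGo (a b : Int) : Int :=
  if hb : b = 0 then a else euclidGo b (PySem.Int.mod a b)
termination_by b.natAbs
decreasing_by exact natAbs_pymod_lt a b hb

def solution_alt (N : Int) (M : Int) : Int :=
  let a := PySem.Int.mod M N
  let g := euclidGo a N
  PySem.Int.floordiv N g

-- ===== PRECONDITION & SPEC =====
-- Pre_ excludes exactly N = 0, where A raises ZeroDivisionError (and so does B)
def Pre_solution (N : Int) (M : Int) : Prop := N ≠ 0
instance (N : Int) (M : Int) : Decidable (Pre_solution N M) := by unfold Pre_solution; infer_instance
def pvWitness_solution : Int × Int := (6, 4)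

def Spec_solution (N : Int) (M : Int) (out : Int) : Prop := out = solution_alt N M
instance (N : Int) (M : Int) (out : Int) : Decidable (Spec_solution N M out) := by unfold Spec_solution; infer_instance

-- ===== CLAIM (what is proved, stated in full; the proofs are below) =====
def Claim_equal_solution : Prop := ∀ (N : Int) (M : Int), Dom_solution N M → Pre_solution N M → Spec_solution N M (solution N M)

-- ===== LEMMAS AND PROOFS =====

-- Python's % is invariant under adding a multiple of the divisor
theorem pymod_add_mul (x z b : Int) (hb : b ≠ 0) :
    PySem.Int.mod (x + b * z) b = PySem.Int.mod x b := by
  rcases lt_or_gt_of_ne hb with h | h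
  · have hx' : (-x : Int) + -b * z = -(x + b * z) := by ring
    have hpos : (0:Int) < -b := by omega
    have e1 : PySem.Int.mod (-(x + b * z)) (-b) = -PySem.Int.mod (x + b * z) b :=
      PySem.Int.mod_neg_neg _ _
    have e2 : PySem.Int.mod (-x) (-b) = -PySem.Int.mod x b := PySem.Int.mod_neg_neg _ _
    have e3 : PySem.Int.mod (-x + -b * z) (-b) = PySem.Int.mod (-x) (-b) := by
      rw [PySem.Int.mod_eq_emod_of_pos hpos, PySem.Int.mod_eq_emod_of_pos hpos]
      exact Int.add_mul_emod_self_left (-x) (-b) z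
    rw [hx'] at e3
    omega
  · rw [PySem.Int.mod_eq_emod_of_pos h, PySem.Int.mod_eq_emod_of_pos h]
    exact Int.add_mul_emod_self_left x b z

-- gcd is preserved when the first argument is reduced mod the second
theorem gcd_pymod (a b : Int) : Int.gcd b (PySem.Int.mod a b) = Int.gcd a b := by
  have h : PySem.Int.mod a b = a + -(PySem.Int.floordiv a b) * b := by
    linear_combination PySem.Int.floordiv_mul_add_mod a b
  rw [h, Int.gcd_comm b, Int.gcd_add_mul_right_left]

-- the Euclidean loop returns sign(b) * gcd(a, b) whenever b ≠ 0
theorem euclidGo_eq : ∀ (f : Nat) (a b : Int), b.natAbs ≤ f → b ≠ 0 →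
    euclidGo a b = b.sign * (Int.gcd a b : Int) := by
  intro f
  induction f with
  | zero => intro a b hle hb; omega
  | succ f ih =>
    intro a b hle hb
    rw [euclidGo, dif_neg hb]
    by_cases h0 : PySem.Int.mod a b = 0
    · rw [h0, euclidGo, dif_pos rfl]
      have hdvd : b ∣ a := (PySem.Int.mod_eq_zero_iff_dvd a b).mp h0
      have h1 : b.natAbs ∣ a.natAbs := Int.natAbs_dvd_natAbs.mpr hdvd
      have hg : Int.gcd a b = b.natAbs :=
        Nat.dvd_antisymm (Nat.gcd_dvd_right _ _) (Nat.dvd_gcd h1 dvd_rfl)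
      rw [hg, Int.sign_mul_natAbs]
    · have hlt := natAbs_pymod_lt a b hb
      have hrec := ih b (PySem.Int.mod a b) (by omega) h0
      rw [hrec, gcd_pymod]
      have hsign : (PySem.Int.mod a b).sign = b.sign := by
        rcases lt_or_gt_of_ne hb with h | h
        · have hb' := PySem.Int.mod_neg_bounds a h
          have hrneg : PySem.Int.mod a b < 0 := by omega
          rw [Int.sign_eq_neg_one_of_neg hrneg, Int.sign_eq_neg_one_of_neg h]
        · have h1 := PySem.Int.mod_nonneg a h
          have hrpos : 0 < PySem.Int.mod a b := by omega
          rw [Int.sign_eq_one_of_pos hrpos, Int.sign_eq_one_of_pos h]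
      rw [hsign]

-- N ∣ k*M ↔ (|N| / gcd(N,M)) ∣ k   (the loop's period)
theorem dvd_mul_iff_period (N M : Int) (hN : N ≠ 0) (k : Nat) :
    (N ∣ (k : Int) * M) ↔ (N.natAbs / Int.gcd N M) ∣ k := by
  have hn : 0 < N.natAbs := by omega
  have hg : 0 < Int.gcd N M := Nat.gcd_pos_of_pos_left M.natAbs hn
  have h1 : (N ∣ (k : Int) * M) ↔ N.natAbs ∣ k * M.natAbs := by
    rw [← Int.natAbs_dvd_natAbs, Int.natAbs_mul, Int.natAbs_natCast]
  obtain ⟨d, hdn⟩ : Int.gcd N M ∣ N.natAbs := Nat.gcd_dvd_left _ _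
  obtain ⟨e, hem⟩ : Int.gcd N M ∣ M.natAbs := Nat.gcd_dvd_right _ _
  have hdg : N.natAbs / Int.gcd N M = d := by rw [hdn]; exact Nat.mul_div_cancel_left d hg
  have heg : M.natAbs / Int.gcd N M = e := by rw [hem]; exact Nat.mul_div_cancel_left e hg
  have hcop : Nat.Coprime d e := by
    rw [← hdg, ← heg]; exact Nat.coprime_div_gcd_div_gcd hg
  rw [h1, hdg]
  constructor
  · intro hd
    rw [hdn, hem] at hd
    have h2 : k * (Int.gcd N M * e) = Int.gcd N M * (k * e) := by ring
    rw [h2] at hd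
    have h3 : d ∣ k * e := (mul_dvd_mul_iff_left (show Int.gcd N M ≠ 0 by omega)).mp hd
    exact hcop.dvd_of_dvd_mul_right h3
  · rintro ⟨c, rfl⟩
    rw [hdn, hem]
    exact ⟨c * e, by ring⟩

-- the walk returns |N| / gcd(N, M): invariant eaten = 1 + k, calcV = ((k+1)*M) % N
theorem solutionGo_spec (N M : Int) (hN : N ≠ 0) :
    ∀ (fuel k : Nat), k + 1 ≤ N.natAbs / Int.gcd N M → N.natAbs / Int.gcd N M ≤ k + 1 + fuel →
    solutionGo N M (PySem.Int.mod (((k : Int) + 1) * M) N) (1 + (k : Int)) fuel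
      = ((N.natAbs / Int.gcd N M : Nat) : Int) := by
  intro fuel
  induction fuel with
  | zero =>
    intro k h1 h2
    simp only [solutionGo]
    omega
  | succ fuel ih =>
    intro k h1 h2
    by_cases hk : k + 1 = N.natAbs / Int.gcd N M
    · have hdvd : N ∣ ((k : Int) + 1) * M := by
        have hc : ((k : Int) + 1) = ((k + 1 : Nat) : Int) := by push_cast; ring
        rw [hc, dvd_mul_iff_period N M hN, hk]
      have hz : PySem.Int.mod (((k : Int) + 1) * M) N = 0 :=
        (PySem.Int.mod_eq_zero_iff_dvd _ _).mpr hdvd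
      simp only [solutionGo, hz, ne_eq, not_true_eq_false, if_false]
      omega
    · have hklt : k + 1 < N.natAbs / Int.gcd N M := by omega
      have hnz : PySem.Int.mod (((k : Int) + 1) * M) N ≠ 0 := by
        intro hz
        have hdvd := (PySem.Int.mod_eq_zero_iff_dvd _ _).mp hz
        have hc : ((k : Int) + 1) = ((k + 1 : Nat) : Int) := by push_cast; ring
        rw [hc, dvd_mul_iff_period N M hN] at hdvd
        have := Nat.le_of_dvd (by omega) hdvd
        omega
      simp only [solutionGo, hnz, ne_eq, not_false_eq_true, if_true]
      have hstep : PySem.Int.mod (PySem.Int.mod (((k : Int) + 1) * M) N + M) N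
          = PySem.Int.mod (((k : Int) + 1 + 1) * M) N := by
        have hq := PySem.Int.floordiv_mul_add_mod (((k : Int) + 1) * M) N
        have hrw : PySem.Int.mod (((k : Int) + 1) * M) N + M
            = ((k : Int) + 1 + 1) * M + N * (-(PySem.Int.floordiv (((k : Int) + 1) * M) N)) := by
          linear_combination hq
        rw [hrw, pymod_add_mul _ _ _ hN]
      have hcast : ((k : Int) + 1 + 1) = (((k + 1 : Nat) : Int) + 1) := by push_cast; ring
      have heat : 1 + (k : Int) + 1 = 1 + ((k + 1 : Nat) : Int) := by push_cast; ring
      rw [hstep, hcast, heat]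
      exact ih (k + 1) (by omega) (by omega)

theorem solution_eq (N M : Int) (hN : N ≠ 0) :
    solution N M = ((N.natAbs / Int.gcd N M : Nat) : Int) := by
  have hn : 0 < N.natAbs := by omega
  have hg : 0 < Int.gcd N M := Nat.gcd_pos_of_pos_left M.natAbs hn
  have hgle : Int.gcd N M ≤ N.natAbs := Nat.le_of_dvd hn (Nat.gcd_dvd_left _ _)
  have ht1 : 1 ≤ N.natAbs / Int.gcd N M := (Nat.one_le_div_iff hg).mpr hgle
  have ht2 : N.natAbs / Int.gcd N M ≤ N.natAbs := Nat.div_le_self _ _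
  have hb1 : 0 + 1 ≤ N.natAbs / Int.gcd N M := by omega
  have hb2 : N.natAbs / Int.gcd N M ≤ 0 + 1 + N.natAbs := by omega
  have hmain := solutionGo_spec N M hN N.natAbs 0 hb1 hb2
  have h0 : (((0 : Nat) : Int) + 1) * M = (0 : Int) + M := by norm_num
  have h1 : 1 + ((0 : Nat) : Int) = (1 : Int) := by norm_num
  rw [h0, h1] at hmain
  exact hmain

theorem solution_alt_eq (N M : Int) (hN : N ≠ 0) :
    solution_alt N M = ((N.natAbs / Int.gcd N M : Nat) : Int) := by
  show PySem.Int.floordiv N (euclidGo (PySem.Int.mod M N) N) = _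
  rw [euclidGo_eq N.natAbs (PySem.Int.mod M N) N (le_refl _) hN]
  have hgM : Int.gcd (PySem.Int.mod M N) N = Int.gcd N M := by
    rw [Int.gcd_comm, gcd_pymod]; exact Int.gcd_comm M N
  rw [hgM]
  set g := Int.gcd N M with hg'
  set n := N.natAbs with hn'
  rcases lt_or_gt_of_ne hN with h | h
  · have hs : N.sign = -1 := Int.sign_eq_neg_one_of_neg h
    have hNe : N = -((n : Nat) : Int) := by omega
    have hmul : (-1 : Int) * ((g : Nat) : Int) = -((g : Nat) : Int) := by ring
    rw [hs, hmul, hNe, PySem.Int.floordiv_neg_neg, PySem.Int.floordiv_natCast]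
  · have hs : N.sign = 1 := Int.sign_eq_one_of_pos h
    have hNe : N = ((n : Nat) : Int) := by omega
    rw [hs, one_mul, hNe, PySem.Int.floordiv_natCast]

-- ===== VERDICT (by name: the statement is the Claim_ definition above) =====
theorem solution_spec : Claim_equal_solution := by
  intro N M _ hpre
  unfold Spec_solution
  rw [solution_eq N M hpre, solution_alt_eq N M hpre]
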